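-- pv_equiv track=rewrite | github.com/AntonJanHart/Evony-Gear-Calculator | evony_gear_level_calculator.py | calculate_units_needed
-- ===== SOURCE A (Python) =====
-- def calculate_units_needed(target_level, current_units):
--     """
--     Calculate exactly how many units need to be purchased to reach the target level.
--
--     Args:
--         target_level (int): The desired level to reach (1-indexed)
--         current_units (list): List of current units at each level, starting from level 1
--
--         Example:
--             # To reach level 7 with units at levels 1-6
--             python level_calculator.py 1,0,1,2,1,2
--
--             # Using spaces instead of commas
--             python level_calculator.py 1 0 1 2 1 2
--
--     Returns:
--         tuple: (units_to_buy, total_cost, final_units)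
--     """
--     UNIT_COST = 200
--
--     # If we already have at least one unit at the target level, we're done
--     if len(current_units) >= target_level and current_units[target_level-1] > 0:
--         return 0, 0, current_units
--
--     # Calculate the total equivalent level 1 units based on what we have
--     total_equivalent_units = 0
--     for level, count in enumerate(current_units):
--         # Each unit at level N is worth 3^(N-1) units at level 1
--         total_equivalent_units += count * (3 ** level)
--
--     # Calculate how many level 1 units are needed for one unit at the target level
--     units_needed_for_target = 3 ** (target_level - 1)
--
--     # Calculate how many more level 1 units to buy
--     units_to_buy = max(0, units_needed_for_target - total_equivalent_units)
--     total_cost = units_to_buy * UNIT_COST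
--
--     # Calculate final distribution of units
--     # At target level we'll have exactly 1 unit
--     final_units = [0] * target_level
--     final_units[target_level-1] = 1
--
--     # Calculate remaining units after conversion
--     # First, how many level 1 equivalent units we'll have total
--     total_units = total_equivalent_units + units_to_buy
--
--     # The remaining units after creating the target level unit
--     remaining = total_units - units_needed_for_target
--
--     # Distribute remaining units from bottom to top
--     for level in range(target_level - 1):
--         # How many units remain at this level
--         final_units[level] = remaining % (3 ** (level + 1)) // (3 ** level)
--
--     return units_to_buy, total_cost, final_units
-- ===== SOURCE B (Python) =====
-- def calculate_units_needed(target_level, current_units):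
--     UNIT_COST = 200
--
--     if len(current_units) >= target_level and current_units[target_level - 1] > 0:
--         return 0, 0, current_units
--
--     # Normalize the levels below the target into proper base-3 digits by carry
--     # propagation (3 units at a level become one carry into the next level).
--     digits = []
--     carry = 0
--     low = 0
--     pw = 1
--     for level in range(target_level - 1):
--         c = (current_units[level] if level < len(current_units) else 0) + carry
--         carry, d = divmod(c, 3)
--         digits.append(d)
--         low += d * pw
--         pw *= 3
--     # h = how many whole target-level units the stock amounts to (carry plus
--     # everything already sitting at or above the target level).
--     h = 0
--     for count in reversed(current_units[target_level - 1:]):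
--         h = h * 3 + count
--     h += carry
--     if h >= 1:
--         # Enough stock: the normalized digits are already the final distribution.
--         return 0, 0, digits + [1]
--     units_to_buy = pw * (1 - h) - low
--     return units_to_buy, units_to_buy * UNIT_COST, [0] * (target_level - 1) + [1]
-- ===== Notes on version B (the rewrite author's own statement) =====
-- stated objective: alternative
-- what changed: B never forms the total level-1-equivalent integer nor extracts digits from a remainder: it normalizes the levels below the target into base-3 digits by carry propagation (divmod of count+carry at each level), decides the purchase by the sign of the stock sitting at or above the target level, and reuses those carried digits (or zeros after a purchase) as the final distribution, whereas A sums count*3**level into one big total and recomputes every final digit as remaining % 3**(l+1) // 3**l.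
import Mathlib
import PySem

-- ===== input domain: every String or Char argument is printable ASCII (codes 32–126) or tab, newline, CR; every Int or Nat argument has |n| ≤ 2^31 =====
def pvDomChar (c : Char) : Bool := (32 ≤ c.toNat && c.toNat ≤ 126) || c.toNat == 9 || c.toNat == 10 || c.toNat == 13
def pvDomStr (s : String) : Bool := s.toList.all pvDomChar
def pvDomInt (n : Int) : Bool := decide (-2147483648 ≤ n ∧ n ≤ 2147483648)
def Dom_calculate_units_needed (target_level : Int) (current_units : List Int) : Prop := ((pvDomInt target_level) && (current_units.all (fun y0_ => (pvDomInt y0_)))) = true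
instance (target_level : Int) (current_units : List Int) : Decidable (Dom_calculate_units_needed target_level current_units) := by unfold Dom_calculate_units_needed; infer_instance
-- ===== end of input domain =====

-- B replaces A's big-integer arithmetic (sum of count*3**level, then remaining % 3**(l+1) // 3**l
-- per final digit) by base-3 carry propagation over the levels and a sign test (objective: alternative).

-- ===== PORT A =====
def calculate_units_needed (target_level : Int) (current_units : List Int) : Int × Int × List Int :=
  if target_level ≤ (current_units.length : Int) ∧
     ((PySem.List.pyGet? current_units (target_level - 1)).getD 0 > 0) then
    (0, 0, current_units)
  else
    let total_equivalent_units :=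
      (PySem.List.enumerate current_units 0).foldl
        (fun acc p => acc + p.2 * (3 : Int) ^ p.1.toNat) 0
    let units_needed_for_target := (3 : Int) ^ (target_level - 1).toNat
    let units_to_buy := max 0 (units_needed_for_target - total_equivalent_units)
    let total_cost := units_to_buy * 200
    let total_units := total_equivalent_units + units_to_buy
    let remaining := total_units - units_needed_for_target
    let final_units0 := (List.replicate target_level.toNat (0 : Int)).set (target_level - 1).toNat 1
    let final_units :=
      (List.range (target_level - 1).toNat).foldl
        (fun fu level =>
          fu.set level (PySem.Int.floordiv (PySem.Int.mod remaining ((3 : Int) ^ (level + 1)))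
                        ((3 : Int) ^ level)))
        final_units0
    (units_to_buy, total_cost, final_units)

-- ===== PORT B =====
-- State of B's carry loop: (digits, carry, low, pw), exactly Source B's four variables.
def calculate_units_needed_alt (target_level : Int) (current_units : List Int) : Int × Int × List Int :=
  if target_level ≤ (current_units.length : Int) ∧
     ((PySem.List.pyGet? current_units (target_level - 1)).getD 0 > 0) then
    (0, 0, current_units)
  else
    let st :=
      (List.range (target_level - 1).toNat).foldl
        (fun (st : List Int × Int × Int × Int) level =>
          let c := (if level < current_units.length then current_units.getD level 0 else 0) + st.2.1
          (st.1 ++ [PySem.Int.mod c 3], PySem.Int.floordiv c 3,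
           st.2.2.1 + PySem.Int.mod c 3 * st.2.2.2, st.2.2.2 * 3))
        ([], 0, 0, 1)
    let h := (PySem.List.slice current_units (some (target_level - 1)) none).reverse.foldl
               (fun h c => h * 3 + c) 0 + st.2.1
    if 1 ≤ h then
      (0, 0, st.1 ++ [1])
    else
      let units_to_buy := st.2.2.2 * (1 - h) - st.2.2.1
      (units_to_buy, units_to_buy * 200, List.replicate (target_level - 1).toNat 0 ++ [1])

-- ===== PRECONDITION & SPEC =====
-- Pre_ excludes only inputs where A raises or leaves the type: non-positive target_level for which
-- the early-return guard does not fire (there A hits 3**negative, a float, or an IndexError).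
def Pre_calculate_units_needed (target_level : Int) (current_units : List Int) : Prop :=
  1 ≤ target_level ∨
    (target_level ≤ (current_units.length : Int) ∧
      ((PySem.List.pyGet? current_units (target_level - 1)).getD 0 > 0))
instance (target_level : Int) (current_units : List Int) : Decidable (Pre_calculate_units_needed target_level current_units) := by unfold Pre_calculate_units_needed; infer_instance
def pvWitness_calculate_units_needed : Int × List Int := (3, [1, 0, 2])
def Spec_calculate_units_needed (target_level : Int) (current_units : List Int) (out : Int × Int × List Int) : Prop := out = calculate_units_needed_alt target_level current_units
instance (target_level : Int) (current_units : List Int) (out : Int × Int × List Int) : Decidable (Spec_calculate_units_needed target_level current_units out) := by unfold Spec_calculate_units_needed; infer_instance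

-- ===== CLAIM (what is proved, stated in full; the proofs are below) =====
def Claim_equal_calculate_units_needed : Prop := ∀ (target_level : Int) (current_units : List Int), Dom_calculate_units_needed target_level current_units → Pre_calculate_units_needed target_level current_units → Spec_calculate_units_needed target_level current_units (calculate_units_needed target_level current_units)

-- ===== LEMMAS AND PROOFS =====

-- Value of the list read as base-3 "digit counts" (A's total, in reference form).
def pvHorner (l : List Int) : Int := l.foldr (fun c a => a * 3 + c) 0

-- Value of the first n levels (missing levels count 0).
def pvS (cu : List Int) (n : Nat) : Int := ((List.range n).map (fun k => cu.getD k 0 * 3 ^ k)).sum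

theorem pvHorner_enum (cu : List Int) : ∀ (s : Nat) (a : Int),
    (PySem.List.enumerate cu (s : Int)).foldl (fun acc p => acc + p.2 * (3 : Int) ^ p.1.toNat) a
      = a + 3 ^ s * pvHorner cu := by
  induction cu with
  | nil => intro s a; simp [PySem.List.enumerate, pvHorner]
  | cons x xs ih =>
    intro s a
    rw [PySem.List.enumerate_cons]
    have h1 : ((s : Int) + 1) = ((s + 1 : Nat) : Int) := by push_cast; ring
    simp only [List.foldl_cons, h1, ih (s + 1)]
    simp only [pvHorner, List.foldr_cons]
    have : ((s : Int)).toNat = s := Int.toNat_natCast s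
    rw [this, pow_succ]
    ring

-- Split the total at level n: everything below plus 3^n times the tail.
theorem pvSplit (cu : List Int) : ∀ (n : Nat),
    pvHorner cu = pvS cu n + 3 ^ n * pvHorner (cu.drop n) := by
  intro n
  induction n with
  | zero => simp [pvS]
  | succ n ih =>
    rw [ih]
    have hS : pvS cu (n + 1) = pvS cu n + cu.getD n 0 * 3 ^ n := by
      simp [pvS, List.range_succ]
    rw [hS]
    by_cases h : n < cu.length
    · rw [List.drop_eq_getElem_cons h]
      have hgd : cu.getD n 0 = cu[n] := List.getD_eq_getElem cu 0 h
      simp only [pvHorner, List.foldr_cons, hgd, pow_succ]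
      ring
    · have h1 : cu.drop n = [] := List.drop_eq_nil_of_le (by omega)
      have h2 : cu.drop (n + 1) = [] := List.drop_eq_nil_of_le (by omega)
      have h3 : cu.getD n 0 = 0 := List.getD_eq_default cu 0 (by omega)
      simp [h1, h2, pvHorner, List.getElem?_eq_none (show cu.length ≤ n by omega)]

-- Adding a multiple of 3^n does not change any base-3 digit below level n.
theorem pvDigit_stable (L c : Int) {l n : Nat} (h : l < n) :
    ((L + c * 3 ^ n) / 3 ^ l) % 3 = (L / 3 ^ l) % 3 := by
  obtain ⟨m, hm⟩ : ∃ m, n = m + 1 + l := ⟨n - l - 1, by omega⟩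
  subst hm
  have h1 : c * 3 ^ (m + 1 + l) = (c * 3 ^ m * 3) * 3 ^ l := by
    rw [pow_add, pow_succ]; ring
  rw [h1, Int.add_mul_ediv_right _ _ (by positivity : (3:Int) ^ l ≠ 0)]
  have h2 : L / 3 ^ l + c * 3 ^ m * 3 = L / 3 ^ l + 3 * (c * 3 ^ m) := by ring
  rw [h2, Int.add_mul_emod_self_left]

-- The standard digit split of an emod: x % 3^(n+1) = x % 3^n + 3^n * digit n.
theorem pvEmod_succ (x : Int) (n : Nat) :
    x % 3 ^ (n + 1) = x % 3 ^ n + 3 ^ n * ((x / 3 ^ n) % 3) := by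
  rw [Int.emod_def x ((3:Int) ^ (n+1)), Int.emod_def x ((3:Int) ^ n),
      Int.emod_def (x / (3:Int) ^ n) 3,
      Int.ediv_ediv_of_nonneg (by positivity : (0:Int) ≤ 3 ^ n), pow_succ]
  ring

-- Invariant of B's carry loop: after n steps the state is determined by L = pvS cu n.
theorem pvLoopInv (cu : List Int) : ∀ (n : Nat),
    (List.range n).foldl
        (fun (st : List Int × Int × Int × Int) level =>
          let c := (if level < cu.length then cu.getD level 0 else 0) + st.2.1
          (st.1 ++ [PySem.Int.mod c 3], PySem.Int.floordiv c 3,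
           st.2.2.1 + PySem.Int.mod c 3 * st.2.2.2, st.2.2.2 * 3))
        ([], 0, 0, 1)
      = ((List.range n).map (fun l => (pvS cu n / 3 ^ l) % 3),
         pvS cu n / 3 ^ n, pvS cu n % 3 ^ n, (3 : Int) ^ n) := by
  intro n
  induction n with
  | zero => simp [pvS]
  | succ n ih =>
    rw [List.range_succ, List.foldl_append, ih, List.foldl_cons, List.foldl_nil]
    have hc : (if n < cu.length then cu.getD n 0 else 0) = cu.getD n 0 := by
      split_ifs with h
      · rfl
      · exact (List.getD_eq_default cu 0 (by omega)).symm
    have hS : pvS cu (n + 1) = pvS cu n + cu.getD n 0 * 3 ^ n := by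
      simp [pvS, List.range_succ]
    have hdiv : pvS cu (n + 1) / 3 ^ n = cu.getD n 0 + pvS cu n / 3 ^ n := by
      rw [hS, Int.add_mul_ediv_right _ _ (by positivity : (3:Int) ^ n ≠ 0)]; ring
    simp only [hc, Prod.mk.injEq]
    refine ⟨?_, ?_, ?_, ?_⟩
    · show (List.range n).map (fun l => (pvS cu n / 3 ^ l) % 3)
          ++ [PySem.Int.mod (cu.getD n 0 + pvS cu n / 3 ^ n) 3]
        = (List.range n ++ [n]).map (fun l => (pvS cu (n + 1) / 3 ^ l) % 3)
      rw [List.map_append]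
      congr 1
      · refine List.map_congr_left (fun l hl => ?_)
        have hln : l < n := List.mem_range.mp hl
        rw [hS, pvDigit_stable _ _ hln]
      · rw [PySem.Int.mod_eq_emod_of_pos (by norm_num), ← hdiv]
        simp
    · show PySem.Int.floordiv (cu.getD n 0 + pvS cu n / 3 ^ n) 3 = pvS cu (n + 1) / 3 ^ (n + 1)
      rw [PySem.Int.floordiv_eq_ediv_of_pos (by norm_num), ← hdiv,
          Int.ediv_ediv_of_nonneg (by positivity : (0:Int) ≤ 3 ^ n), ← pow_succ]
    · show pvS cu n % 3 ^ n + PySem.Int.mod (cu.getD n 0 + pvS cu n / 3 ^ n) 3 * 3 ^ n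
          = pvS cu (n + 1) % 3 ^ (n + 1)
      rw [PySem.Int.mod_eq_emod_of_pos (by norm_num), ← hdiv, pvEmod_succ]
      have : pvS cu (n + 1) % 3 ^ n = pvS cu n % 3 ^ n := by
        rw [hS, Int.add_mul_emod_self_right _ _ _]
      rw [this]; ring
    · show (3 : Int) ^ n * 3 = 3 ^ (n + 1)
      rw [pow_succ]

-- A's index-assignment loop writes g 0 … g (n-1) into replicate n 0 ++ [1].
theorem pvSet_fold (g : Nat → Int) : ∀ (n : Nat) (xs : List Int), n ≤ xs.length →
    (List.range n).foldl (fun fu l => fu.set l (g l)) xs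
      = (List.range n).map g ++ xs.drop n := by
  intro n
  induction n with
  | zero => intro xs _; simp
  | succ n ih =>
    intro xs h
    rw [List.range_succ, List.foldl_append, ih xs (by omega)]
    have hlt : n < xs.length := by omega
    have hdrop : xs.drop n = xs[n] :: xs.drop (n + 1) := by
      rw [List.drop_eq_getElem_cons hlt]
    simp only [List.foldl_cons, List.foldl_nil]
    rw [List.set_append]
    rw [hdrop]
    simp
    rw [hdrop]
    rfl

-- A's per-level digit formula, reduced to an ediv/emod digit of remaining.
theorem pvDigit_eq (r : Int) (l : Nat) :
    PySem.Int.floordiv (PySem.Int.mod r ((3 : Int) ^ (l + 1))) ((3 : Int) ^ l)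
      = (r / 3 ^ l) % 3 := by
  rw [PySem.Int.mod_eq_emod_of_pos (by positivity),
      PySem.Int.floordiv_eq_ediv_of_pos (by positivity)]
  have h3 : ((3 : Int) ^ l) ≠ 0 := by positivity
  have hA : (r % 3 ^ (l + 1)) / (3 : Int) ^ l = r / 3 ^ l + -(r / 3 ^ (l + 1) * 3) := by
    rw [Int.emod_def, sub_eq_add_neg,
        show -((3 : Int) ^ (l + 1) * (r / 3 ^ (l + 1))) = -(r / 3 ^ (l + 1) * 3) * 3 ^ l from by
          rw [pow_succ]; ring,
        Int.add_mul_ediv_right _ _ h3]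
  have hB : (r / (3 : Int) ^ l) / 3 = r / 3 ^ (l + 1) := by
    rw [Int.ediv_ediv_of_nonneg (by positivity : (0:Int) ≤ 3 ^ l), ← pow_succ]
  rw [hA, Int.emod_def, hB]
  ring

-- ===== VERDICT (by name: the statement is the Claim_ definition above) =====
theorem calculate_units_needed_spec : Claim_equal_calculate_units_needed := by
  intro t cu _ hpre
  unfold Spec_calculate_units_needed calculate_units_needed calculate_units_needed_alt
  by_cases hg : t ≤ (cu.length : Int) ∧ ((PySem.List.pyGet? cu (t - 1)).getD 0 > 0)
  · simp [hg]
  · have ht : 1 ≤ t := by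
      rcases hpre with h | h
      · exact h
      · exact absurd h hg
    set n := (t - 1).toNat with hn
    have htn : (t - 1) = (n : Int) := by omega
    -- A's total is pvHorner cu
    have htot : (PySem.List.enumerate cu 0).foldl
          (fun acc p => acc + p.2 * (3 : Int) ^ p.1.toNat) 0 = pvHorner cu := by
      simpa using pvHorner_enum cu 0 0
    -- B's tail sum is pvHorner (cu.drop n)
    have htail : (PySem.List.slice cu (some (t - 1)) none).reverse.foldl
          (fun h c => h * 3 + c) 0 = pvHorner (cu.drop n) := by
      rw [htn, PySem.List.slice_from_natCast, List.foldl_reverse]; rfl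
    simp only [if_neg hg, htot, pvLoopInv, htail]
    set L := pvS cu n with hL
    set H := pvHorner (cu.drop n) with hH
    have h0 : L % 3 ^ n + 3 ^ n * (L / 3 ^ n) = L := Int.emod_add_mul_ediv L ((3:Int) ^ n)
    have hT : pvHorner cu = L % 3 ^ n + 3 ^ n * (H + L / 3 ^ n) := by
      rw [pvSplit cu n, ← hL, ← hH]
      linear_combination -h0
    set h := H + L / 3 ^ n with hh
    have hlow0 : 0 ≤ L % 3 ^ n := Int.emod_nonneg L (by positivity)
    have hlowlt : L % 3 ^ n < 3 ^ n := Int.emod_lt_of_pos L (by positivity)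
    -- rebuild A's final_units base list
    have htn' : t.toNat = n + 1 := by omega
    have hbase : (List.replicate t.toNat (0 : Int)).set (t - 1).toNat 1
        = List.replicate n 0 ++ [1] := by
      rw [htn', List.replicate_succ', List.set_append]
      simp [hn]
    by_cases hcase : 1 ≤ h
    · -- stock suffices: A buys 0 and its digits equal B's carried digits
      have hp : (0:Int) < 3 ^ n := by positivity
      have hbuy : max 0 ((3:Int) ^ n - pvHorner cu) = 0 := by
        rw [hT]; rw [max_eq_left]; nlinarith
      simp only [if_pos hcase, hbuy]
      refine Prod.ext rfl (Prod.ext (by ring) ?_)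
      show (List.range n).foldl _ _ = _
      rw [hbase, pvSet_fold _ n _ (by simp)]
      have hdropn : (List.replicate n (0:Int) ++ [1]).drop n = [1] := by
        rw [List.drop_append_of_le_length (by simp)]; simp
      rw [hdropn]
      congr 1
      refine List.map_congr_left (fun l hl => ?_)
      have hln : l < n := List.mem_range.mp hl
      rw [pvDigit_eq]
      have hrem : pvHorner cu + 0 - 3 ^ n = L + (h - 1 - L / 3 ^ n) * 3 ^ n := by
        rw [hT]; linear_combination h0
      rw [hrem, pvDigit_stable _ _ hln]
    · -- must buy: A's max picks the deficit and all digits are 0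
      have hp : (0:Int) < 3 ^ n := by positivity
      have hbuy : max 0 ((3:Int) ^ n - pvHorner cu) = 3 ^ n * (1 - h) - L % 3 ^ n := by
        have hle : h ≤ 0 := by omega
        rw [hT, max_eq_right (by nlinarith)]
        ring
      simp only [if_neg hcase, hbuy]
      refine Prod.ext (by ring) (Prod.ext (by ring) ?_)
      show (List.range n).foldl _ _ = _
      rw [hbase, pvSet_fold _ n _ (by simp)]
      have hdropn : (List.replicate n (0:Int) ++ [1]).drop n = [1] := by
        rw [List.drop_append_of_le_length (by simp)]; simp
      rw [hdropn]
      have hrem : pvHorner cu + (3 ^ n * (1 - h) - L % 3 ^ n) - 3 ^ n = 0 := by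
        rw [hT]; ring
      rw [hrem]
      have : ∀ l ∈ List.range n, PySem.Int.floordiv (PySem.Int.mod (0:Int) ((3:Int) ^ (l + 1))) ((3:Int) ^ l) = 0 := by
        intro l _
        rw [pvDigit_eq]; simp
      rw [List.map_congr_left this]
      simp [List.map_const']
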